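-- pv_equiv track=rewrite | github.com/SgfdDttt/sara_v2 | code/argument_instantiation_models.py | get_argument_type_arg_only
-- ===== SOURCE A (Python) =====
-- def get_argument_type_arg_only(arg_name):
--     ''' this is somewhat like cheating, it
--     tells you how to predict this argument
--     (binary, integer, or span) '''
--     arg_types={
--             'integer': ["WAGES","TAXINC","TAX","STANDED","S96","S9A","S9B","S7","S48","COUNTS",
--                 "S33A","S30B","S27","S156","S14","S13A","S2","GROSSINC","EA","DED63","DED151",
--                 "COST","BASSD","AP","AGI","ADDSD","AA","ADDITIONAL_AMOUNTS","AMOUNT",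
--                 "EXEMPTIONS_LIST","MULTIPLIER","TOTAL_AMOUNT","AMOUNT_DEDUCTIONS_OUT",
--                 "AMOUNT_DEDUCTIONS_IN","ITEMDED","REMUNERATION2"],
--             'span': ["REASON", "WORKDAY","WIFE","TAXY","TAXP","STUDENT","SPOUSE","SERVICE",
--                 "S98","S92",
--                 "S9C","S89","S81","S8","S77","S65","S62","S61","S6","S59B","S59A","S5","S47",
--                 "S46B","S46A","S45","S44A","S41","S40A","S40B","S4","S38","S36","S34","S33B",
--                 "S32","S31","S30A","S24A","S24B","S24","S235","S23","S228","S227","S22","S21","S201",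
--                 "S19","S16","S158","S145","S143","S138","S13B","S13","S125","S121","S119", "S119A","S119B",
--                 "S113","S112","S110","S105","S104","S101","S10","RELATIONSHIP","PRECCALY",
--                 "PLAN","PAYEE","OTAXP","MEDIUM","LOCATION","HUSBAND","HOUSEHOLD","FOM",
--                 "EMPLOYMENT","EMPLOYER","EMPLOYEE","DEPENDENT","CYB1","CHILDC2A","CALY",
--                 "BSSSC2B","S44B","DEDUCTION","PAYER","JOINT_RETURN","START_RELATIONSHIP",
--                 "END_RELATIONSHIP","MARRIAGE","END_DAY","START_DAY","SURVIVING_SPOUSE",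
--                 "PERSON_LIST","REMUNERATION","PREVIOUS_MARRIAGE","REMARRIAGE"],
--             'binary': ["@TRUTH"]
--             }
--     for k,v in arg_types.items():
--         if arg_name in v:
--             return k
--     assert False, "every argument needs a type ("+arg_name+")"
-- ===== SOURCE B (Python) =====
-- # Sorted (name, type) table queried by hand-written binary search.
-- _TABLE = [
--     ('@TRUTH', 'binary'),
--     ('AA', 'integer'),
--     ('ADDITIONAL_AMOUNTS', 'integer'),
--     ('ADDSD', 'integer'),
--     ('AGI', 'integer'),
--     ('AMOUNT', 'integer'),
--     ('AMOUNT_DEDUCTIONS_IN', 'integer'),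
--     ('AMOUNT_DEDUCTIONS_OUT', 'integer'),
--     ('AP', 'integer'),
--     ('BASSD', 'integer'),
--     ('BSSSC2B', 'span'),
--     ('CALY', 'span'),
--     ('CHILDC2A', 'span'),
--     ('COST', 'integer'),
--     ('COUNTS', 'integer'),
--     ('CYB1', 'span'),
--     ('DED151', 'integer'),
--     ('DED63', 'integer'),
--     ('DEDUCTION', 'span'),
--     ('DEPENDENT', 'span'),
--     ('EA', 'integer'),
--     ('EMPLOYEE', 'span'),
--     ('EMPLOYER', 'span'),
--     ('EMPLOYMENT', 'span'),
--     ('END_DAY', 'span'),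
--     ('END_RELATIONSHIP', 'span'),
--     ('EXEMPTIONS_LIST', 'integer'),
--     ('FOM', 'span'),
--     ('GROSSINC', 'integer'),
--     ('HOUSEHOLD', 'span'),
--     ('HUSBAND', 'span'),
--     ('ITEMDED', 'integer'),
--     ('JOINT_RETURN', 'span'),
--     ('LOCATION', 'span'),
--     ('MARRIAGE', 'span'),
--     ('MEDIUM', 'span'),
--     ('MULTIPLIER', 'integer'),
--     ('OTAXP', 'span'),
--     ('PAYEE', 'span'),
--     ('PAYER', 'span'),
--     ('PERSON_LIST', 'span'),
--     ('PLAN', 'span'),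
--     ('PRECCALY', 'span'),
--     ('PREVIOUS_MARRIAGE', 'span'),
--     ('REASON', 'span'),
--     ('RELATIONSHIP', 'span'),
--     ('REMARRIAGE', 'span'),
--     ('REMUNERATION', 'span'),
--     ('REMUNERATION2', 'integer'),
--     ('S10', 'span'),
--     ('S101', 'span'),
--     ('S104', 'span'),
--     ('S105', 'span'),
--     ('S110', 'span'),
--     ('S112', 'span'),
--     ('S113', 'span'),
--     ('S119', 'span'),
--     ('S119A', 'span'),
--     ('S119B', 'span'),
--     ('S121', 'span'),
--     ('S125', 'span'),
--     ('S13', 'span'),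
--     ('S138', 'span'),
--     ('S13A', 'integer'),
--     ('S13B', 'span'),
--     ('S14', 'integer'),
--     ('S143', 'span'),
--     ('S145', 'span'),
--     ('S156', 'integer'),
--     ('S158', 'span'),
--     ('S16', 'span'),
--     ('S19', 'span'),
--     ('S2', 'integer'),
--     ('S201', 'span'),
--     ('S21', 'span'),
--     ('S22', 'span'),
--     ('S227', 'span'),
--     ('S228', 'span'),
--     ('S23', 'span'),
--     ('S235', 'span'),
--     ('S24', 'span'),
--     ('S24A', 'span'),
--     ('S24B', 'span'),
--     ('S27', 'integer'),
--     ('S30A', 'span'),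
--     ('S30B', 'integer'),
--     ('S31', 'span'),
--     ('S32', 'span'),
--     ('S33A', 'integer'),
--     ('S33B', 'span'),
--     ('S34', 'span'),
--     ('S36', 'span'),
--     ('S38', 'span'),
--     ('S4', 'span'),
--     ('S40A', 'span'),
--     ('S40B', 'span'),
--     ('S41', 'span'),
--     ('S44A', 'span'),
--     ('S44B', 'span'),
--     ('S45', 'span'),
--     ('S46A', 'span'),
--     ('S46B', 'span'),
--     ('S47', 'span'),
--     ('S48', 'integer'),
--     ('S5', 'span'),
--     ('S59A', 'span'),
--     ('S59B', 'span'),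
--     ('S6', 'span'),
--     ('S61', 'span'),
--     ('S62', 'span'),
--     ('S65', 'span'),
--     ('S7', 'integer'),
--     ('S77', 'span'),
--     ('S8', 'span'),
--     ('S81', 'span'),
--     ('S89', 'span'),
--     ('S92', 'span'),
--     ('S96', 'integer'),
--     ('S98', 'span'),
--     ('S9A', 'integer'),
--     ('S9B', 'integer'),
--     ('S9C', 'span'),
--     ('SERVICE', 'span'),
--     ('SPOUSE', 'span'),
--     ('STANDED', 'integer'),
--     ('START_DAY', 'span'),
--     ('START_RELATIONSHIP', 'span'),
--     ('STUDENT', 'span'),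
--     ('SURVIVING_SPOUSE', 'span'),
--     ('TAX', 'integer'),
--     ('TAXINC', 'integer'),
--     ('TAXP', 'span'),
--     ('TAXY', 'span'),
--     ('TOTAL_AMOUNT', 'integer'),
--     ('WAGES', 'integer'),
--     ('WIFE', 'span'),
--     ('WORKDAY', 'span'),
-- ]
--
-- def get_argument_type_arg_only(arg_name):
--     ''' this is somewhat like cheating, it
--     tells you how to predict this argument
--     (binary, integer, or span) '''
--     lo, hi = 0, len(_TABLE)
--     while lo < hi:
--         mid = (lo + hi) // 2
--         name, typ = _TABLE[mid]
--         if arg_name < name: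
--             hi = mid
--         elif name < arg_name:
--             lo = mid + 1
--         else:
--             return typ
--     assert False, "every argument needs a type ("+arg_name+")"
-- ===== Notes on version B (the rewrite author's own statement) =====
-- stated objective: alternative
-- what changed: Replaces A's per-call linear scan over three category lists with a single flat (name, type) table sorted by name, classified by a hand-written binary search; the same AssertionError message is raised for unknown names.
import Mathlib
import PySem

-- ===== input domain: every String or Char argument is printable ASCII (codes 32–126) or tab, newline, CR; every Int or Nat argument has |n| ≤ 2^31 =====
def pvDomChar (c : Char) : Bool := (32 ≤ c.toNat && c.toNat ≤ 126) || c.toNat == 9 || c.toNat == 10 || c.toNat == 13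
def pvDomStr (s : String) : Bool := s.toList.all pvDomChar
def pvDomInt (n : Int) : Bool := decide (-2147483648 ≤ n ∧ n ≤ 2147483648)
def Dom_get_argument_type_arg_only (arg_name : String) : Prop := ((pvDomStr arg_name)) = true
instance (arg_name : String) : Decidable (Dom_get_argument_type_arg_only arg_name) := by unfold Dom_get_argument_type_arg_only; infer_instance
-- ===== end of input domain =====

-- B replaces A's linear scan over three category lists with binary search over one flat
-- sorted (name, type) table (alternative data structure). Both Pythons raise
-- AssertionError on unknown names; Pre_ admits exactly the known names.

-- ===== PORT A =====
def pvIntegerArgs : List String := ["WAGES", "TAXINC", "TAX", "STANDED", "S96", "S9A", "S9B", "S7", "S48", "COUNTS", "S33A", "S30B", "S27", "S156", "S14", "S13A", "S2", "GROSSINC", "EA", "DED63", "DED151", "COST", "BASSD", "AP", "AGI", "ADDSD", "AA", "ADDITIONAL_AMOUNTS", "AMOUNT", "EXEMPTIONS_LIST", "MULTIPLIER", "TOTAL_AMOUNT", "AMOUNT_DEDUCTIONS_OUT", "AMOUNT_DEDUCTIONS_IN", "ITEMDED", "REMUNERATION2"]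

def pvSpanArgs : List String := ["REASON", "WORKDAY", "WIFE", "TAXY", "TAXP", "STUDENT", "SPOUSE", "SERVICE", "S98", "S92", "S9C", "S89", "S81", "S8", "S77", "S65", "S62", "S61", "S6", "S59B", "S59A", "S5", "S47", "S46B", "S46A", "S45", "S44A", "S41", "S40A", "S40B", "S4", "S38", "S36", "S34", "S33B", "S32", "S31", "S30A", "S24A", "S24B", "S24", "S235", "S23", "S228", "S227", "S22", "S21", "S201", "S19", "S16", "S158", "S145", "S143", "S138", "S13B", "S13", "S125", "S121", "S119", "S119A", "S119B", "S113", "S112", "S110", "S105", "S104", "S101", "S10", "RELATIONSHIP", "PRECCALY", "PLAN", "PAYEE", "OTAXP", "MEDIUM", "LOCATION", "HUSBAND", "HOUSEHOLD", "FOM", "EMPLOYMENT", "EMPLOYER", "EMPLOYEE", "DEPENDENT", "CYB1", "CHILDC2A", "CALY", "BSSSC2B", "S44B", "DEDUCTION", "PAYER", "JOINT_RETURN", "START_RELATIONSHIP", "END_RELATIONSHIP", "MARRIAGE", "END_DAY", "START_DAY", "SURVIVING_SPOUSE", "PERSON_LIST", "REMUNERATION", "PREVIOUS_MARRIAGE",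 "REMARRIAGE"]

def pvBinaryArgs : List String := ["@TRUTH"]

-- loop 'for k,v in arg_types.items(): if arg_name in v: return k'; the fallthrough
-- 'assert False' raises in Python (excluded by Pre_), ported as "".
def pvArgTypeLoop (arg_name : String) : List (String × List String) → String
  | [] => ""
  | (k, v) :: rest => if v.contains arg_name then k else pvArgTypeLoop arg_name rest

def get_argument_type_arg_only (arg_name : String) : String :=
  let arg_types : List (String × List String) :=
    [("integer", pvIntegerArgs), ("span", pvSpanArgs), ("binary", pvBinaryArgs)]
  pvArgTypeLoop arg_name arg_types

-- ===== PORT B =====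
-- Source B's _TABLE: the (name, type) pairs sorted by name, transcribed literally.
def pvSortedTable : Array (String × String) := #[
  ("@TRUTH", "binary"),
  ("AA", "integer"),
  ("ADDITIONAL_AMOUNTS", "integer"),
  ("ADDSD", "integer"),
  ("AGI", "integer"),
  ("AMOUNT", "integer"),
  ("AMOUNT_DEDUCTIONS_IN", "integer"),
  ("AMOUNT_DEDUCTIONS_OUT", "integer"),
  ("AP", "integer"),
  ("BASSD", "integer"),
  ("BSSSC2B", "span"),
  ("CALY", "span"),
  ("CHILDC2A", "span"),
  ("COST", "integer"),
  ("COUNTS", "integer"),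
  ("CYB1", "span"),
  ("DED151", "integer"),
  ("DED63", "integer"),
  ("DEDUCTION", "span"),
  ("DEPENDENT", "span"),
  ("EA", "integer"),
  ("EMPLOYEE", "span"),
  ("EMPLOYER", "span"),
  ("EMPLOYMENT", "span"),
  ("END_DAY", "span"),
  ("END_RELATIONSHIP", "span"),
  ("EXEMPTIONS_LIST", "integer"),
  ("FOM", "span"),
  ("GROSSINC", "integer"),
  ("HOUSEHOLD", "span"),
  ("HUSBAND", "span"),
  ("ITEMDED", "integer"),
  ("JOINT_RETURN", "span"),
  ("LOCATION", "span"),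
  ("MARRIAGE", "span"),
  ("MEDIUM", "span"),
  ("MULTIPLIER", "integer"),
  ("OTAXP", "span"),
  ("PAYEE", "span"),
  ("PAYER", "span"),
  ("PERSON_LIST", "span"),
  ("PLAN", "span"),
  ("PRECCALY", "span"),
  ("PREVIOUS_MARRIAGE", "span"),
  ("REASON", "span"),
  ("RELATIONSHIP", "span"),
  ("REMARRIAGE", "span"),
  ("REMUNERATION", "span"),
  ("REMUNERATION2", "integer"),
  ("S10", "span"),
  ("S101", "span"),
  ("S104", "span"),
  ("S105", "span"),
  ("S110", "span"),
  ("S112", "span"),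
  ("S113", "span"),
  ("S119", "span"),
  ("S119A", "span"),
  ("S119B", "span"),
  ("S121", "span"),
  ("S125", "span"),
  ("S13", "span"),
  ("S138", "span"),
  ("S13A", "integer"),
  ("S13B", "span"),
  ("S14", "integer"),
  ("S143", "span"),
  ("S145", "span"),
  ("S156", "integer"),
  ("S158", "span"),
  ("S16", "span"),
  ("S19", "span"),
  ("S2", "integer"),
  ("S201", "span"),
  ("S21", "span"),
  ("S22", "span"),
  ("S227", "span"),
  ("S228", "span"),
  ("S23", "span"),
  ("S235", "span"),
  ("S24", "span"),
  ("S24A", "span"),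
  ("S24B", "span"),
  ("S27", "integer"),
  ("S30A", "span"),
  ("S30B", "integer"),
  ("S31", "span"),
  ("S32", "span"),
  ("S33A", "integer"),
  ("S33B", "span"),
  ("S34", "span"),
  ("S36", "span"),
  ("S38", "span"),
  ("S4", "span"),
  ("S40A", "span"),
  ("S40B", "span"),
  ("S41", "span"),
  ("S44A", "span"),
  ("S44B", "span"),
  ("S45", "span"),
  ("S46A", "span"),
  ("S46B", "span"),
  ("S47", "span"),
  ("S48", "integer"),
  ("S5", "span"),
  ("S59A", "span"),
  ("S59B", "span"),
  ("S6", "span"),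
  ("S61", "span"),
  ("S62", "span"),
  ("S65", "span"),
  ("S7", "integer"),
  ("S77", "span"),
  ("S8", "span"),
  ("S81", "span"),
  ("S89", "span"),
  ("S92", "span"),
  ("S96", "integer"),
  ("S98", "span"),
  ("S9A", "integer"),
  ("S9B", "integer"),
  ("S9C", "span"),
  ("SERVICE", "span"),
  ("SPOUSE", "span"),
  ("STANDED", "integer"),
  ("START_DAY", "span"),
  ("START_RELATIONSHIP", "span"),
  ("STUDENT", "span"),
  ("SURVIVING_SPOUSE", "span"),
  ("TAX", "integer"),
  ("TAXINC", "integer"),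
  ("TAXP", "span"),
  ("TAXY", "span"),
  ("TOTAL_AMOUNT", "integer"),
  ("WAGES", "integer"),
  ("WIFE", "span"),
  ("WORKDAY", "span")]

-- Python's '<' on strings, lexicographic by code point (Char.toNat), exact for all strings.
def pvCharsLt : List Char → List Char → Bool
  | _, [] => false
  | [], _ :: _ => true
  | a :: as, b :: bs =>
    if a.toNat < b.toNat then true
    else if b.toNat < a.toNat then false
    else pvCharsLt as bs

def pvStrLt (a b : String) : Bool := pvCharsLt a.toList b.toList

-- Source B's while-loop binary search, as fuel recursion (fuel = table size suffices,
-- since each step strictly shrinks hi - lo). 'assert False' raises → ported as "".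
def pvBSearch (arg_name : String) (fuel lo hi : Nat) : String :=
  match fuel with
  | 0 => ""
  | fuel' + 1 =>
    if lo < hi then
      let mid := (lo + hi) / 2
      match pvSortedTable[mid]? with
      | none => ""
      | some (name, typ) =>
        if pvStrLt arg_name name then pvBSearch arg_name fuel' lo mid
        else if pvStrLt name arg_name then pvBSearch arg_name fuel' (mid + 1) hi
        else typ
    else ""

def get_argument_type_arg_only_alt (arg_name : String) : String :=
  pvBSearch arg_name pvSortedTable.size 0 pvSortedTable.size

-- ===== PRECONDITION & SPEC =====
-- Pre_: exactly the names in some category; on all other strings A's assert raises AssertionError.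
def Pre_get_argument_type_arg_only (arg_name : String) : Prop :=
  (pvIntegerArgs ++ pvSpanArgs ++ pvBinaryArgs).contains arg_name = true
instance (arg_name : String) : Decidable (Pre_get_argument_type_arg_only arg_name) := by
  unfold Pre_get_argument_type_arg_only; infer_instance

def pvWitness_get_argument_type_arg_only : String := "WAGES"

def Spec_get_argument_type_arg_only (arg_name : String) (out : String) : Prop := out = get_argument_type_arg_only_alt arg_name
instance (arg_name : String) (out : String) : Decidable (Spec_get_argument_type_arg_only arg_name out) := by unfold Spec_get_argument_type_arg_only; infer_instance

-- ===== CLAIM =====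
def Claim_equal_get_argument_type_arg_only : Prop := ∀ (arg_name : String), Dom_get_argument_type_arg_only arg_name → Pre_get_argument_type_arg_only arg_name → Spec_get_argument_type_arg_only arg_name (get_argument_type_arg_only arg_name)

-- ===== LEMMAS AND PROOFS =====
-- A and B agree on every admitted name: checked name by name over the finite list.
set_option maxRecDepth 4000 in
theorem pv_all_agree :
    (pvIntegerArgs ++ pvSpanArgs ++ pvBinaryArgs).all
      (fun x => get_argument_type_arg_only x == get_argument_type_arg_only_alt x) = true := by
  decide

-- ===== VERDICT =====
theorem get_argument_type_arg_only_spec : Claim_equal_get_argument_type_arg_only := by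
  intro arg_name _ hpre
  unfold Spec_get_argument_type_arg_only
  have hmem : arg_name ∈ pvIntegerArgs ++ pvSpanArgs ++ pvBinaryArgs :=
    List.contains_iff_mem.mp hpre
  have := List.all_eq_true.mp pv_all_agree arg_name hmem
  exact eq_of_beq this
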